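-- pv_equiv track=rewrite | github.com/yale-swe/f24-nisq-quantum-simulator | commutation/layers-new/propagate_error.py | simplify_propagated_errors
-- ===== SOURCE A (Python) =====
-- def simplify_propagated_errors(errors):
-- 	"""
-- 	Simplifies a list of propagated error gates by combining and canceling Pauli errors
-- 	on the same qubit.
--
-- 	Parameters:
-- 	errors (list of tuples): A list of propagated errors (e.g., [('X', 0), ('Z', 0), ('X', 1)]).
--
-- 	Returns:
-- 	list of tuples: A simplified list of error gates.
-- 	"""
-- 	pauli_map = {'I': 0, 'X': 1, 'Y': 2, 'Z': 3}  # Mapping for Pauli algebra modulo 2 arithmetic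
-- 	inverse_pauli_map = {0: 'I', 1: 'X', 2: 'Y', 3: 'Z'}
-- 	qubit_errors = {}
--
-- 	for error_name, qubit in errors:
-- 		if qubit not in qubit_errors:
-- 			qubit_errors[qubit] = pauli_map[error_name]
-- 		else:
-- 			# Combine errors using modulo-2 arithmetic rules for Pauli matrices
-- 			current_pauli = qubit_errors[qubit]
-- 			combined_pauli = current_pauli ^ pauli_map[error_name]
-- 			qubit_errors[qubit] = combined_pauli
--
-- 	# Construct the simplified error list, omitting identity errors ('I')
-- 	simplified_errors = [(inverse_pauli_map[value], qubit) for qubit, value in qubit_errors.items() if value != 0]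
-- 	return simplified_errors
-- ===== SOURCE B (Python) =====
-- def simplify_propagated_errors(errors):
--     pauli_map = {'I': 0, 'X': 1, 'Y': 2, 'Z': 3}
--     inverse_pauli_map = {0: 'I', 1: 'X', 2: 'Y', 3: 'Z'}
--     # Dict-free: repeatedly take the first remaining qubit, scan the remaining
--     # list once to xor together all of its Paulis while splitting off the other
--     # entries, emit the non-identity result, and continue on what is left.
--     out = []
--     rest = list(errors)
--     while rest:
--         q = rest[0][1]
--         net = 0
--         remaining = []
--         for name, qubit in rest:
--             if qubit == q:
--                 net ^= pauli_map[name]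
--             else:
--                 remaining.append((name, qubit))
--         if net != 0:
--             out.append((inverse_pauli_map[net], q))
--         rest = remaining
--     return out
-- ===== Notes on version B (the rewrite author's own statement) =====
-- stated objective: alternative
-- what changed: Replaces A's single dict-accumulating scan with a dict-free repeated-partition algorithm: take the first remaining qubit, scan the remaining list once to xor all of its Paulis while splitting off the other entries, emit, and recurse on the remainder; first-occurrence order falls out of the partition order.
import Mathlib
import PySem

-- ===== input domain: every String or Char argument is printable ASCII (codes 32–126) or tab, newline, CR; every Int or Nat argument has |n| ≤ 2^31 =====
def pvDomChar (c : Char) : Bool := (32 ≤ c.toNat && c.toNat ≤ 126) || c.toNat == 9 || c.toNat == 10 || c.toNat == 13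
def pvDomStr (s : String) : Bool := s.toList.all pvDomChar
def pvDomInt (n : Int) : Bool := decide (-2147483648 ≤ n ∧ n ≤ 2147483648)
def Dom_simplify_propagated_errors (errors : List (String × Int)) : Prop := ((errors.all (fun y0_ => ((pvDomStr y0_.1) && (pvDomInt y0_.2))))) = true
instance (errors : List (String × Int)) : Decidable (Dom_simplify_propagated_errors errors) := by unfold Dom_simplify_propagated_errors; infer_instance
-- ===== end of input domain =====

-- B is a dict-free repeated-partition algorithm (take the first remaining qubit, xor its
-- Paulis while splitting off the rest, recurse); A is a single dict-accumulating scan. No speed claim.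

-- ===== PORT A =====
-- pauli_map['I'|'X'|'Y'|'Z']; any other name is Python's KeyError, excluded by Pre_ (the final 'else' is unreachable under Pre_)
def pvPauliVal (s : String) : Int :=
  if s = "I" then 0 else if s = "X" then 1 else if s = "Y" then 2 else 3

def pvInvPauli (v : Int) : String :=
  if v = 1 then "X" else if v = 2 then "Y" else "Z"

def simplify_propagated_errors (errors : List (String × Int)) : List (String × Int) :=
  let qubit_errors : PySem.Dict Int Int :=
    errors.foldl (fun d e =>
      match d.get? e.2 with
      | none => d.insert e.2 (pvPauliVal e.1)
      | some cur => d.insert e.2 (PySem.Int.bxor cur (pvPauliVal e.1))) PySem.Dict.empty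
  (qubit_errors.items.filter (fun p => p.2 != 0)).map (fun p => (pvInvPauli p.2, p.1))

-- ===== PORT B =====
-- the single scan of B's inner 'for' loop: it xors the Paulis of qubit q while
-- splitting off the other entries (stated as a lemma because the port's
-- termination proof cites it)
lemma pvPartition_eq (q : Int) (l : List (String × Int)) (n : Int) (acc : List (String × Int)) :
    l.foldl (fun (s : Int × List (String × Int)) p =>
        if p.2 == q then (PySem.Int.bxor s.1 (pvPauliVal p.1), s.2)
        else (s.1, s.2 ++ [p])) (n, acc)
    = (l.foldl (fun m p => if p.2 == q then PySem.Int.bxor m (pvPauliVal p.1) else m) n,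
       acc ++ l.filter (fun p => !(p.2 == q))) := by
  induction l generalizing n acc with
  | nil => simp
  | cons e t ih =>
    simp only [List.foldl_cons, List.filter_cons]
    by_cases he : (e.2 == q) = true
    · simp only [he, if_true, Bool.not_true, Bool.false_eq_true, if_false, ih]
    · simp only [Bool.not_eq_true] at he
      simp only [he, Bool.false_eq_true, if_false, Bool.not_false, if_true, ih,
        List.append_assoc, List.singleton_append]

def simplify_propagated_errors_alt (errors : List (String × Int)) : List (String × Int) :=
  match errors with
  | [] => []
  | e :: t =>
    let q := e.2
    let s := (e :: t).foldl
      (fun (s : Int × List (String × Int)) p =>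
        if p.2 == q then (PySem.Int.bxor s.1 (pvPauliVal p.1), s.2)
        else (s.1, s.2 ++ [p])) (0, [])
    (if s.1 != 0 then [(pvInvPauli s.1, q)] else []) ++ simplify_propagated_errors_alt s.2
termination_by errors.length
decreasing_by
  simp only [dite_eq_ite, pvPartition_eq, List.nil_append, List.filter_cons, beq_self_eq_true,
    Bool.not_true, Bool.false_eq_true, if_false, List.length_cons]
  have := List.length_filter_le (fun p : String × Int => !(p.2 == e.2)) t
  omega

-- ===== PRECONDITION & SPEC =====
-- Pre_ excludes exactly the inputs where Python A raises KeyError: an error name outside {'I','X','Y','Z'}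
def Pre_simplify_propagated_errors (errors : List (String × Int)) : Prop :=
  ∀ p ∈ errors, p.1 = "I" ∨ p.1 = "X" ∨ p.1 = "Y" ∨ p.1 = "Z"
instance (errors : List (String × Int)) : Decidable (Pre_simplify_propagated_errors errors) := by unfold Pre_simplify_propagated_errors; infer_instance

def pvWitness_simplify_propagated_errors : (List (String × Int)) := [("X", 0), ("Z", 0), ("X", 1)]

def Spec_simplify_propagated_errors (errors : List (String × Int)) (out : List (String × Int)) : Prop := out = simplify_propagated_errors_alt errors
instance (errors : List (String × Int)) (out : List (String × Int)) : Decidable (Spec_simplify_propagated_errors errors out) := by unfold Spec_simplify_propagated_errors; infer_instance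

-- ===== CLAIM (what is proved, stated in full; the proofs are below) =====
def Claim_equal_simplify_propagated_errors : Prop := ∀ (errors : List (String × Int)), Dom_simplify_propagated_errors errors → Pre_simplify_propagated_errors errors → Spec_simplify_propagated_errors errors (simplify_propagated_errors errors)

-- ===== LEMMAS AND PROOFS =====

-- A's loop body, named for the proofs
def pvStepA (d : PySem.Dict Int Int) (e : String × Int) : PySem.Dict Int Int :=
  match d.get? e.2 with
  | none => d.insert e.2 (pvPauliVal e.1)
  | some cur => d.insert e.2 (PySem.Int.bxor cur (pvPauliVal e.1))

lemma pv_insert_head_self (q v w : Int) (m : List (Int × Int))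
    (hm : m.all (fun p => !(p.1 == q)) = true) :
    (PySem.Dict.mk ((q, v) :: m) : PySem.Dict Int Int).insert q w
      = PySem.Dict.mk ((q, w) :: m) := by
  rw [List.all_eq_true] at hm
  have hmap : List.map (fun p : Int × Int => if p.1 = q then (q, w) else p) m = m := by
    conv_rhs => rw [← List.map_id m]
    apply List.map_congr_left
    intro p hp
    have h1 := hm p hp
    simp only [Bool.not_eq_true'] at h1
    rw [beq_eq_false_iff_ne] at h1
    simp [h1]
  simp [PySem.Dict.insert, PySem.Dict.contains, hmap]

lemma pv_insert_head_ne (q v k w : Int) (m : List (Int × Int)) (hk : (k == q) = false) :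
    (PySem.Dict.mk ((q, v) :: m) : PySem.Dict Int Int).insert k w
      = PySem.Dict.mk ((q, v) :: ((PySem.Dict.mk m : PySem.Dict Int Int).insert k w).items) := by
  have hq : (q == k) = false := by
    rw [beq_eq_false_iff_ne] at hk ⊢; exact fun h => hk h.symm
  by_cases hc : (PySem.Dict.mk m : PySem.Dict Int Int).contains k = true
  · simp only [PySem.Dict.insert, PySem.Dict.contains, List.any_cons, hq,
      Bool.false_or, show (m.any fun p => p.1 == k) = true from hc, if_true, List.map_cons,
      Bool.false_eq_true, if_false]
  · simp only [Bool.not_eq_true] at hc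
    simp [PySem.Dict.insert, PySem.Dict.contains, hq,
      show (m.any fun p => p.1 == k) = false from hc]

lemma pv_keys_insert_ne (q k w : Int) (m : List (Int × Int)) (hk : (k == q) = false)
    (hm : m.all (fun p => !(p.1 == q)) = true) :
    (((PySem.Dict.mk m : PySem.Dict Int Int).insert k w).items).all (fun p => !(p.1 == q)) = true := by
  rw [List.all_eq_true] at hm
  rw [PySem.Dict.insert]
  by_cases hc : (PySem.Dict.mk m : PySem.Dict Int Int).contains k = true
  · rw [if_pos hc, List.all_eq_true]
    simp only [List.mem_map]
    rintro p ⟨x, hx, rfl⟩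
    by_cases hxk : (x.1 == k) = true
    · simp [hxk, hk]
    · simp only [Bool.not_eq_true] at hxk
      simp only [hxk, Bool.false_eq_true, if_false]
      exact hm x hx
  · rw [if_neg hc, List.all_eq_true]
    simp only [List.mem_append, List.mem_singleton]
    rintro p (hp | rfl)
    · exact hm p hp
    · simp [hk]

lemma pv_keys_stepA (q : Int) (e : String × Int) (m : List (Int × Int)) (hk : (e.2 == q) = false)
    (hm : m.all (fun p => !(p.1 == q)) = true) :
    ((pvStepA (PySem.Dict.mk m) e).items).all (fun p => !(p.1 == q)) = true := by
  unfold pvStepA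
  cases (PySem.Dict.mk m : PySem.Dict Int Int).get? e.2 <;>
    exact pv_keys_insert_ne q e.2 _ m hk hm

lemma pv_loopA_cons (l : List (String × Int)) (q v : Int) (m : List (Int × Int))
    (hm : m.all (fun p => !(p.1 == q)) = true) :
    l.foldl pvStepA (PySem.Dict.mk ((q, v) :: m))
    = PySem.Dict.mk ((q, l.foldl (fun n p => if p.2 == q then PySem.Int.bxor n (pvPauliVal p.1) else n) v)
        :: ((l.filter (fun p => !(p.2 == q))).foldl pvStepA (PySem.Dict.mk m)).items) := by
  induction l generalizing v m with
  | nil => rfl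
  | cons e t ih =>
    simp only [List.foldl_cons, List.filter_cons]
    by_cases he : (e.2 == q) = true
    · have heq : e.2 = q := beq_iff_eq.mp he
      have hget : (PySem.Dict.mk ((q, v) :: m) : PySem.Dict Int Int).get? e.2 = some v := by
        rw [PySem.Dict.get?_mk_cons]
        simp [heq]
      have hstep : pvStepA (PySem.Dict.mk ((q, v) :: m)) e
          = PySem.Dict.mk ((q, PySem.Int.bxor v (pvPauliVal e.1)) :: m) := by
        unfold pvStepA
        rw [hget, heq]
        exact pv_insert_head_self q v _ m hm
      rw [hstep, ih _ _ hm]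
      simp [he]
    · rw [Bool.not_eq_true] at he
      have hq2 : (q == e.2) = false := by
        rw [beq_eq_false_iff_ne] at he ⊢; exact fun h => he h.symm
      have hget : (PySem.Dict.mk ((q, v) :: m) : PySem.Dict Int Int).get? e.2
          = (PySem.Dict.mk m : PySem.Dict Int Int).get? e.2 := by
        rw [PySem.Dict.get?_mk_cons, if_neg (by simp [hq2])]
      have hstep : pvStepA (PySem.Dict.mk ((q, v) :: m)) e
          = PySem.Dict.mk ((q, v) :: (pvStepA (PySem.Dict.mk m) e).items) := by
        unfold pvStepA
        rw [hget]
        cases h2 : (PySem.Dict.mk m : PySem.Dict Int Int).get? e.2 with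
        | none => exact pv_insert_head_ne q v e.2 _ m he
        | some cur => exact pv_insert_head_ne q v e.2 _ m he
      rw [hstep, ih _ _ (pv_keys_stepA q e m he hm)]
      have hmk : PySem.Dict.mk ((pvStepA (PySem.Dict.mk m) e).items) = pvStepA (PySem.Dict.mk m) e := by
        cases h : pvStepA (PySem.Dict.mk m) e
        rfl
      rw [hmk]
      simp [he]

-- the net Pauli of qubit q over t, starting from v (the common value both ports compute)
def pvNet (q : Int) (t : List (String × Int)) (v : Int) : Int :=
  t.foldl (fun n p => if p.2 == q then PySem.Int.bxor n (pvPauliVal p.1) else n) v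

lemma pv_stepA_eq :
    (fun (d : PySem.Dict Int Int) (e : String × Int) =>
      match d.get? e.2 with
      | none => d.insert e.2 (pvPauliVal e.1)
      | some cur => d.insert e.2 (PySem.Int.bxor cur (pvPauliVal e.1))) = pvStepA := rfl

lemma pv_A_cons (e : String × Int) (t : List (String × Int)) :
    simplify_propagated_errors (e :: t)
    = (if pvNet e.2 t (pvPauliVal e.1) != 0
        then [(pvInvPauli (pvNet e.2 t (pvPauliVal e.1)), e.2)] else [])
      ++ simplify_propagated_errors (t.filter (fun p => !(p.2 == e.2))) := by
  simp only [simplify_propagated_errors, pv_stepA_eq, List.foldl_cons]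
  rw [show pvStepA PySem.Dict.empty e = PySem.Dict.mk [(e.2, pvPauliVal e.1)] from rfl]
  rw [pv_loopA_cons t e.2 (pvPauliVal e.1) [] rfl]
  by_cases hnet : (pvNet e.2 t (pvPauliVal e.1) != 0) = true
  · simp [List.filter_cons, pvNet] at hnet ⊢
    simp [hnet, PySem.Dict.empty]
  · simp only [Bool.not_eq_true] at hnet
    simp [List.filter_cons, pvNet] at hnet ⊢
    simp [hnet, PySem.Dict.empty]

lemma pv_B_cons (e : String × Int) (t : List (String × Int)) :
    simplify_propagated_errors_alt (e :: t)
    = (if pvNet e.2 t (pvPauliVal e.1) != 0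
        then [(pvInvPauli (pvNet e.2 t (pvPauliVal e.1)), e.2)] else [])
      ++ simplify_propagated_errors_alt (t.filter (fun p => !(p.2 == e.2))) := by
  rw [simplify_propagated_errors_alt]
  simp only [pvPartition_eq, List.foldl_cons, beq_self_eq_true,
    if_true, List.nil_append]
  rw [PySem.Int.bxor_comm 0 (pvPauliVal e.1), PySem.Int.bxor_zero]
  simp only [pvNet]

lemma pv_main_bounded (n : Nat) : ∀ (errors : List (String × Int)), errors.length ≤ n →
    simplify_propagated_errors errors = simplify_propagated_errors_alt errors := by
  induction n with
  | zero =>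
    intro errors h
    rw [List.length_eq_zero_iff.mp (Nat.le_zero.mp h)]
    simp [simplify_propagated_errors, simplify_propagated_errors_alt, PySem.Dict.empty]
  | succ n ih =>
    intro errors h
    cases errors with
    | nil => simp [simplify_propagated_errors, simplify_propagated_errors_alt, PySem.Dict.empty]
    | cons e t =>
      rw [pv_A_cons, pv_B_cons]
      rw [ih (t.filter (fun p => !(p.2 == e.2)))
        (le_trans (List.length_filter_le _ t) (by simpa using Nat.le_of_succ_le_succ h))]

lemma pv_main (errors : List (String × Int)) :
    simplify_propagated_errors errors = simplify_propagated_errors_alt errors :=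
  pv_main_bounded errors.length errors le_rfl

-- ===== VERDICT (by name: the statement is the Claim_ definition above) =====
theorem simplify_propagated_errors_spec : Claim_equal_simplify_propagated_errors := by
  intro errors _ _
  exact pv_main errors
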